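-- pv_equiv track=rewrite | github.com/MrBrantCode/unitest_baseline | mut_generate/mist_train_cf/cf_104433/solution.py | element_frequency
-- ===== SOURCE A (Python) =====
-- def element_frequency(lst):
--     """
--     Returns a list of tuples, where each tuple contains an element from the list and its frequency.
--     The list of tuples is sorted in descending order of frequency. If two elements have the same frequency,
--     they are sorted in ascending order.
--
--     Args:
--         lst (list): A list of integers.
--
--     Returns:
--         list: A list of tuples containing elements and their frequencies.
--     """
--     frequency = {}
--     for element in lst:
--         if element in frequency:
--             frequency[element] += 1
--         else:
--             frequency[element] = 1
--
--     return sorted(frequency.items(), key=lambda x: (-x[1], x[0]))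
-- ===== SOURCE B (Python) =====
-- def element_frequency(lst):
--     counts = {}
--     for x in lst:
--         counts[x] = counts.get(x, 0) + 1
--     buckets = {}
--     for x, c in counts.items():
--         buckets.setdefault(c, []).append(x)
--     result = []
--     for f in sorted(buckets, reverse=True):
--         for x in sorted(buckets[f]):
--             result.append((x, f))
--     return result
-- ===== Notes on version B (the rewrite author's own statement) =====
-- stated objective: alternative
-- what changed: Replaces A's single sort of the count-dict items under the composite key (-freq, value) with a group-by-frequency bucket table: B inverts the count dict into frequency buckets, then walks the distinct frequencies in descending order emitting each bucket's elements in ascending order.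
import Mathlib
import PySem

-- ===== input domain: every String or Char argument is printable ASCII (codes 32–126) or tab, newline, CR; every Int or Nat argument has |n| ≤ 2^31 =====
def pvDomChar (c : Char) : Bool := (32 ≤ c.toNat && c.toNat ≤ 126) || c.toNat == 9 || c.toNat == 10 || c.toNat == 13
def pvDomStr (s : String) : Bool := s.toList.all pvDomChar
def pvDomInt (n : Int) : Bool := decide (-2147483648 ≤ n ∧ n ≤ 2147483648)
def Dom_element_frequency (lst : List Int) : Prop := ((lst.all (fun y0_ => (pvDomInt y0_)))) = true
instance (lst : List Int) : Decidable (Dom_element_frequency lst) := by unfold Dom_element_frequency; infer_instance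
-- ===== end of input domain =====

-- B replaces A's single composite-key sort of the count dict by a group-by-frequency
-- bucket table traversed in (frequency desc, element asc) order: objective 'alternative'.

-- ===== PORT A =====
def element_frequency (lst : List Int) : List (Int × Int) :=
  let frequency : PySem.Dict Int Int :=
    lst.foldl (fun d element =>
      if d.contains element then d.insert element (d.getD element 0 + 1)
      else d.insert element 1) PySem.Dict.empty
  PySem.List.sorted2 frequency.items (fun x => -x.2) (fun x => x.1) false

-- ===== PORT B =====
def element_frequency_alt (lst : List Int) : List (Int × Int) :=
  let counts : PySem.Dict Int Int :=
    lst.foldl (fun d x => d.insert x (d.getD x 0 + 1)) PySem.Dict.empty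
  let buckets : PySem.Dict Int (List Int) :=
    counts.items.foldl (fun d p => d.modify p.2 [] (· ++ [p.1])) PySem.Dict.empty
  (PySem.List.sorted buckets.keys (fun f => f) true).foldl
    (fun result f =>
      result ++ (PySem.List.sorted (buckets.getD f []) (fun x => x) false).map (fun x => (x, f)))
    []

-- ===== PRECONDITION & SPEC =====
def Spec_element_frequency (lst : List Int) (out : List (Int × Int)) : Prop := out = element_frequency_alt lst
instance (lst : List Int) (out : List (Int × Int)) : Decidable (Spec_element_frequency lst out) := by unfold Spec_element_frequency; infer_instance

-- ===== CLAIM (what is proved, stated in full; the proofs are below) =====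
def Claim_equal_element_frequency : Prop := ∀ (lst : List Int), Dom_element_frequency lst → Spec_element_frequency lst (element_frequency lst)

-- ===== LEMMAS AND PROOFS =====

-- the lexicographic key Python's (-freq, element) tuple sorts by
def pvKey (p : Int × Int) : Lex (Int × Int) := toLex (-p.2, p.1)

theorem pv_sorted2_eq_sorted_lex {α : Type} (xs : List α) (k1 k2 : α → Int) :
    PySem.List.sorted2 xs k1 k2 false
      = PySem.List.sorted xs (fun a => toLex (k1 a, k2 a)) false := by
  rw [PySem.List.sorted_eq_foldl_insertBy]
  show List.foldl (fun acc x => PySem.List.insertBy _ x acc) [] xs = _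
  congr 1
  funext acc x
  congr 1
  funext a b
  rcases lt_trichotomy (k1 a) (k1 b) with h | h | h
  · simp [Prod.Lex.toLex_lt_toLex, h, not_lt_of_gt h]
  · simp [Prod.Lex.toLex_lt_toLex, h]
  · simp [Prod.Lex.toLex_lt_toLex, h, not_lt_of_gt h, h.ne']

theorem pv_freqA_eq_counter (lst : List Int) :
    lst.foldl (fun d element =>
      if d.contains element then d.insert element (d.getD element 0 + 1)
      else d.insert element 1) PySem.Dict.empty = PySem.Dict.counter lst := by
  rw [← PySem.Dict.foldl_insert_getD_add_one_eq_counter]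
  congr 1
  funext d x
  cases h : d.contains x with
  | true => simp
  | false => rw [PySem.Dict.getD_of_not_contains (h := h)]; simp

theorem element_frequency_spec' (lst : List Int) :
    element_frequency lst = element_frequency_alt lst := by
  unfold element_frequency element_frequency_alt
  rw [pv_freqA_eq_counter, PySem.Dict.foldl_insert_getD_add_one_eq_counter,
    pv_sorted2_eq_sorted_lex]
  set items := (PySem.Dict.counter lst).items with hitems
  have hitems' : items = (PySem.Set.ofList lst).map (fun k => (k, (lst.count k : Int))) :=
    PySem.Dict.items_counter lst
  -- the bucket dict, folded over the swapped items
  set buckets : PySem.Dict Int (List Int) :=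
    items.foldl (fun d p => d.modify p.2 [] (· ++ [p.1])) PySem.Dict.empty with hbdef
  have hswap : buckets
      = (items.map Prod.swap).foldl (fun d q => d.modify q.1 [] (· ++ [q.2])) PySem.Dict.empty := by
    rw [List.foldl_map]; rfl
  -- keys of the bucket dict
  have hkeys : buckets.keys = PySem.Set.ofList (items.map (fun p => p.2)) := by
    rw [hbdef, PySem.Dict.keys_foldl_modify_key items (fun p => p.2) [] (fun _ p => (· ++ [p.1]))]
    simp [PySem.Dict.keys_empty, PySem.Set.update_nil_left]
  -- contents of one bucket
  have hget : ∀ f : Int, buckets.getD f []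
      = (items.filter (fun p => p.2 == f)).map (fun p => p.1) := by
    intro f
    rw [hswap, PySem.Dict.getD_foldl_modify_append, PySem.Dict.getD_empty, List.filter_map]
    simp [Function.comp_def]
  -- items has unique first components
  have hfst : items.map (fun p => p.1) = PySem.Set.ofList lst := by
    rw [hitems']; simp [List.map_map, Function.comp_def]
  have hnd_items : items.Nodup := by
    apply List.Nodup.of_map (fun p => p.1)
    rw [hfst]; exact PySem.Set.nodup_ofList lst
  -- the descending key list
  set K := PySem.List.sorted buckets.keys (fun f => f) true with hK
  have hKperm : K.Perm buckets.keys := PySem.List.sorted_perm _ _ _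
  have hKnd : K.Nodup := hKperm.nodup_iff.mpr (by rw [hkeys]; exact PySem.Set.nodup_ofList _)
  have hKlt : K.Pairwise (fun a b => b < a) := by
    have h1 := PySem.List.sorted_pairwise_rev buckets.keys (fun f => f)
    exact (h1.and hKnd).imp (fun {a b} h => lt_of_le_of_ne h.1 (Ne.symm h.2))
  -- B as a flatMap
  have hB : (PySem.List.sorted buckets.keys (fun f => f) true).foldl
      (fun result f =>
        result ++ (PySem.List.sorted (buckets.getD f []) (fun x => x) false).map (fun x => (x, f)))
      []
      = K.flatMap (fun f =>
          (PySem.List.sorted (buckets.getD f []) (fun x => x) false).map (fun x => (x, f))) := by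
    rw [← hK, PySem.List.foldl_append_eq_flatMap]; rfl
  rw [hB]
  set ys := K.flatMap (fun f =>
    (PySem.List.sorted (buckets.getD f []) (fun x => x) false).map (fun x => (x, f))) with hys
  -- each sorted bucket is strictly increasing
  have hbnd : ∀ f : Int, (buckets.getD f []).Nodup := by
    intro f
    rw [hget f]
    have hsub : ((items.filter (fun p => p.2 == f)).map (fun p => p.1)).Sublist
        (items.map (fun p => p.1)) := List.Sublist.map _ List.filter_sublist
    exact hsub.nodup (by rw [hfst]; exact PySem.Set.nodup_ofList lst)
  have hblt : ∀ f : Int, (PySem.List.sorted (buckets.getD f []) (fun x => x) false).Pairwise (· < ·) := by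
    intro f
    have h1 := PySem.List.sorted_pairwise (buckets.getD f []) (fun x => x)
    have h2 : (PySem.List.sorted (buckets.getD f []) (fun x => x) false).Nodup :=
      (PySem.List.sorted_perm _ _ _).nodup_iff.mpr (hbnd f)
    exact (h1.and h2).imp (fun {a b} h => lt_of_le_of_ne h.1 h.2)
  -- ys is strictly increasing under pvKey
  have hpair : ys.Pairwise (fun a b => pvKey a < pvKey b) := by
    rw [hys, List.pairwise_flatMap]
    constructor
    · intro f _
      refine List.Pairwise.map _ ?_ (hblt f)
      intro a b hab
      exact Prod.Lex.toLex_lt_toLex.mpr (Or.inr ⟨rfl, hab⟩)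
    · refine hKlt.imp ?_
      intro f₁ f₂ hlt p hp q hq
      simp only [List.mem_map] at hp hq
      obtain ⟨x₁, _, rfl⟩ := hp
      obtain ⟨x₂, _, rfl⟩ := hq
      exact Prod.Lex.toLex_lt_toLex.mpr (Or.inl (by omega))
  have hysnd : ys.Nodup := hpair.imp (fun {a b} h => by
    intro hab; rw [hab] at h; exact lt_irrefl _ h)
  -- ys has the same members as items
  have hmem : ∀ p : Int × Int, p ∈ ys ↔ p ∈ items := by
    intro p
    rw [hys]
    simp only [List.mem_flatMap, List.mem_map, PySem.List.mem_sorted]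
    constructor
    · rintro ⟨f, hf, x, hx, rfl⟩
      rw [hget f] at hx
      simp only [List.mem_map, List.mem_filter, beq_iff_eq] at hx
      obtain ⟨q, ⟨hq, hq2⟩, hq1⟩ := hx
      have : q = (x, f) := by rw [← hq1, ← hq2]
      rwa [this] at hq
    · intro hp
      refine ⟨p.2, ?_, p.1, ?_, rfl⟩
      · rw [hK, PySem.List.mem_sorted, hkeys, PySem.Set.mem_ofList, List.mem_map]
        exact ⟨p, hp, rfl⟩
      · rw [hget p.2]
        simp only [List.mem_map, List.mem_filter, beq_iff_eq]
        exact ⟨p, ⟨hp, rfl⟩, rfl⟩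
  have hperm : ys.Perm items :=
    (List.perm_ext_iff_of_nodup hysnd hnd_items).mpr hmem
  show PySem.List.sorted items pvKey false = ys
  exact (PySem.List.sorted_eq_of_perm_of_pairwise_lt items ys pvKey hperm hpair)

-- ===== VERDICT (by name: the statement is the Claim_ definition above) =====
theorem element_frequency_spec : Claim_equal_element_frequency := by
  intro lst _
  unfold Spec_element_frequency
  exact element_frequency_spec' lst
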